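-- pv_equiv track=rewrite | github.com/hakjunjoo/test-repo | 프로그래머스/1/86491. 최소직사각형/최소직사각형.py | solution
-- ===== SOURCE A (Python) =====
-- def solution(sizes):
--     width = []
--     hight = []
--     for size in sizes :
--         if size[0] > size[1] :
--             width.append(size[0])
--             hight.append(size[1])
--         else :
--             width.append(size[1])
--             hight.append(size[0])
--
--     answer = max(width) * max(hight)
--     return answer
-- ===== SOURCE B (Python) =====
-- def solution(sizes):
--     # Divide and conquer: recursively split the index range in half; each half
--     # yields the best (width, height) for its cards, halves combine by pointwise max.
--     if not sizes:
--         raise ValueError("solution() arg is an empty sequence")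
--     def rect(lo, hi):
--         if hi - lo == 1:
--             a, b = sizes[lo][0], sizes[lo][1]
--             return (a, b) if a >= b else (b, a)
--         mid = (lo + hi) // 2
--         w1, h1 = rect(lo, mid)
--         w2, h2 = rect(mid, hi)
--         return (w1 if w1 >= w2 else w2, h1 if h1 >= h2 else h2)
--     w, h = rect(0, len(sizes))
--     return w * h
-- ===== Notes on version B (the rewrite author's own statement) =====
-- stated objective: alternative
-- what changed: Divide-and-conquer over the index range: each half recursively yields its best (width,height) pair and halves are combined by pointwise max, instead of A's single loop appending to two lists and taking max of each.
import Mathlib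
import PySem

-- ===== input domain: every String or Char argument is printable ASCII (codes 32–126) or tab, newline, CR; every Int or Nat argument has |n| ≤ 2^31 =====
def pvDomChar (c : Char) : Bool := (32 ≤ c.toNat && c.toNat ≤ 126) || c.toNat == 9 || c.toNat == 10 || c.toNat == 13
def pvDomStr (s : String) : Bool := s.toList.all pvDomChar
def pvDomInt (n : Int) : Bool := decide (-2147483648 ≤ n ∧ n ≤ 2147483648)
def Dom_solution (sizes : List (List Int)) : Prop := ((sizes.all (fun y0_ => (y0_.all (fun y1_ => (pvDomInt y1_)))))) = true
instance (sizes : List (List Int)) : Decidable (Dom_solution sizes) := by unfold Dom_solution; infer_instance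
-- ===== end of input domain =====

-- B solves the task by divide and conquer on the index range (combine halves by pointwise max)
-- instead of A's loop building two lists and taking max of each; return value only.

-- ===== PORT A =====
def solution (sizes : List (List Int)) : Int :=
  let wh := sizes.foldl (fun (p : List Int × List Int) size =>
    let a := (PySem.List.pyGet? size 0).getD 0
    let b := (PySem.List.pyGet? size 1).getD 0
    if a > b then (p.1 ++ [a], p.2 ++ [b]) else (p.1 ++ [b], p.2 ++ [a]))
    ([], [])
  ((PySem.List.max? wh.1 (fun y => y)).getD 0) * ((PySem.List.max? wh.2 (fun y => y)).getD 0)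

-- ===== PORT B =====
-- rect(lo, hi) of Source B; the extra fuel argument only makes the recursion total in Lean
-- (it is never exhausted on the calls solution_alt makes, where hi - lo ≤ fuel and lo < hi).
def rect (sizes : List (List Int)) : Nat → Nat → Nat → Int × Int
  | 0, _, _ => (0, 0)
  | fuel + 1, lo, hi =>
    if hi - lo = 1 then
      let s := (PySem.List.pyGet? sizes (lo : Int)).getD []
      let a := (PySem.List.pyGet? s 0).getD 0
      let b := (PySem.List.pyGet? s 1).getD 0
      if a ≥ b then (a, b) else (b, a)
    else
      let mid := (lo + hi) / 2
      let p1 := rect sizes fuel lo mid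
      let p2 := rect sizes fuel mid hi
      (if p1.1 ≥ p2.1 then p1.1 else p2.1, if p1.2 ≥ p2.2 then p1.2 else p2.2)

-- (Python B raises ValueError on []; the port returns 0 there, outside Pre_solution.)
def solution_alt (sizes : List (List Int)) : Int :=
  if sizes = [] then 0
  else
    let p := rect sizes sizes.length 0 sizes.length
    p.1 * p.2

-- ===== PRECONDITION & SPEC =====
-- Pre_ excludes exactly the inputs where the Python A raises: the empty list (max([]) is
-- ValueError) and any inner list with fewer than two entries (IndexError).
def Pre_solution (sizes : List (List Int)) : Prop :=
  sizes ≠ [] ∧ ∀ s ∈ sizes, 2 ≤ s.length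
instance (sizes : List (List Int)) : Decidable (Pre_solution sizes) := by unfold Pre_solution; infer_instance

def pvWitness_solution : List (List Int) := [[3, 5], [7, 2]]

def Spec_solution (sizes : List (List Int)) (out : Int) : Prop := out = solution_alt sizes
instance (sizes : List (List Int)) (out : Int) : Decidable (Spec_solution sizes out) := by unfold Spec_solution; infer_instance

-- ===== CLAIM (what is proved, stated in full; the proofs are below) =====
def Claim_equal_solution : Prop := ∀ (sizes : List (List Int)), Dom_solution sizes → Pre_solution sizes → Spec_solution sizes (solution sizes)

-- ===== LEMMAS AND PROOFS =====

-- larger/smaller side of a card, as values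
def wOf (s : List Int) : Int := max ((PySem.List.pyGet? s 0).getD 0) ((PySem.List.pyGet? s 1).getD 0)
def hOf (s : List Int) : Int := min ((PySem.List.pyGet? s 0).getD 0) ((PySem.List.pyGet? s 1).getD 0)

-- max of a nonempty list (0 on [])
def mmax : List Int → Int
  | [] => 0
  | x :: t => t.foldl max x

-- the segment sizes[lo:hi]
def seg (sizes : List (List Int)) (lo hi : Nat) : List (List Int) :=
  (sizes.drop lo).take (hi - lo)

theorem foldA_eq (sizes : List (List Int)) (ws hs : List Int) :
    sizes.foldl (fun (p : List Int × List Int) size =>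
      let a := (PySem.List.pyGet? size 0).getD 0
      let b := (PySem.List.pyGet? size 1).getD 0
      if a > b then (p.1 ++ [a], p.2 ++ [b]) else (p.1 ++ [b], p.2 ++ [a])) (ws, hs)
    = (ws ++ sizes.map wOf, hs ++ sizes.map hOf) := by
  induction sizes generalizing ws hs with
  | nil => simp
  | cons s t ih =>
    simp only [List.foldl, List.map]
    split_ifs with h
    · rw [ih]
      have hw : wOf s = (PySem.List.pyGet? s 0).getD 0 := by simp [wOf]; omega
      have hh : hOf s = (PySem.List.pyGet? s 1).getD 0 := by simp [hOf]; omega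
      simp [hw, hh]
    · rw [ih]
      have hw : wOf s = (PySem.List.pyGet? s 1).getD 0 := by simp [wOf]; omega
      have hh : hOf s = (PySem.List.pyGet? s 0).getD 0 := by simp [hOf]; omega
      simp [hw, hh]

theorem foldl_max_init (l : List Int) (m x : Int) :
    l.foldl max (max m x) = max m (l.foldl max x) := by
  induction l generalizing x with
  | nil => rfl
  | cons y t ih => simpa [List.foldl, max_assoc] using ih (max x y)

theorem mmax_append (l1 l2 : List Int) (h1 : l1 ≠ []) (h2 : l2 ≠ []) :
    mmax (l1 ++ l2) = max (mmax l1) (mmax l2) := by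
  obtain ⟨x, t, rfl⟩ := List.exists_cons_of_ne_nil h1
  obtain ⟨y, u, rfl⟩ := List.exists_cons_of_ne_nil h2
  simp only [mmax, List.cons_append, List.foldl_append, List.foldl]
  exact foldl_max_init u (t.foldl max x) y

theorem seg_split (sizes : List (List Int)) (lo mid hi : Nat)
    (h1 : lo ≤ mid) (h2 : mid ≤ hi) :
    seg sizes lo hi = seg sizes lo mid ++ seg sizes mid hi := by
  unfold seg
  have : hi - lo = (mid - lo) + (hi - mid) := by omega
  have h4 : lo + (mid - lo) = mid := by omega
  rw [this, List.take_add, List.drop_drop, h4]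

theorem seg_ne_nil (sizes : List (List Int)) (lo hi : Nat)
    (h1 : lo < hi) (h2 : hi ≤ sizes.length) : seg sizes lo hi ≠ [] := by
  unfold seg
  intro h
  have := congrArg List.length h
  simp at this
  omega

theorem rect_eq (sizes : List (List Int)) (fuel lo hi : Nat)
    (h1 : lo < hi) (h2 : hi ≤ sizes.length) (h3 : hi - lo ≤ fuel) :
    rect sizes fuel lo hi
      = (mmax ((seg sizes lo hi).map wOf), mmax ((seg sizes lo hi).map hOf)) := by
  induction fuel generalizing lo hi with
  | zero => omega
  | succ fuel ih =>
    rw [rect]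
    by_cases hone : hi - lo = 1
    · have hlt : lo < sizes.length := by omega
      have hseg : seg sizes lo hi = [sizes[lo]] := by
        unfold seg
        rw [hone, List.drop_eq_getElem_cons hlt]
        rfl
      rw [if_pos hone, hseg]
      have hget : (PySem.List.pyGet? sizes (lo : Int)).getD [] = sizes[lo] := by
        simp [PySem.List.pyGet?_natCast, List.getElem?_eq_getElem hlt]
      simp only [hget, List.map, mmax, List.foldl, wOf, hOf]
      split_ifs with h <;> simp only [Prod.mk.injEq] <;> constructor <;> omega
    · rw [if_neg hone]
      have hmid1 : lo < (lo + hi) / 2 := by omega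
      have hmid2 : (lo + hi) / 2 < hi := by omega
      simp only [ih lo ((lo + hi) / 2) hmid1 (by omega) (by omega),
          ih ((lo + hi) / 2) hi hmid2 h2 (by omega)]
      have hs := seg_split sizes lo ((lo + hi) / 2) hi (by omega) (by omega)
      have n1 : (seg sizes lo ((lo + hi) / 2)).map wOf ≠ [] := by
        simp [seg_ne_nil sizes lo ((lo + hi) / 2) hmid1 (by omega)]
      have n2 : (seg sizes ((lo + hi) / 2) hi).map wOf ≠ [] := by
        simp [seg_ne_nil sizes ((lo + hi) / 2) hi hmid2 h2]
      have n3 : (seg sizes lo ((lo + hi) / 2)).map hOf ≠ [] := by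
        simp [seg_ne_nil sizes lo ((lo + hi) / 2) hmid1 (by omega)]
      have n4 : (seg sizes ((lo + hi) / 2) hi).map hOf ≠ [] := by
        simp [seg_ne_nil sizes ((lo + hi) / 2) hi hmid2 h2]
      rw [hs]
      simp only [List.map_append, mmax_append _ _ n1 n2, mmax_append _ _ n3 n4]
      rw [Prod.mk.injEq]
      constructor <;> · simp only [ge_iff_le, max_def]; split_ifs <;> omega

-- ===== VERDICT (by name: the statement is the Claim_ definition above) =====
theorem solution_spec : Claim_equal_solution := by
  intro sizes _hd hpre
  obtain ⟨hne, -⟩ := hpre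
  unfold Spec_solution solution solution_alt
  rw [if_neg hne, foldA_eq]
  have hlen : 0 < sizes.length := List.length_pos_of_ne_nil hne
  rw [rect_eq sizes sizes.length 0 sizes.length hlen le_rfl (by omega)]
  have hseg : seg sizes 0 sizes.length = sizes := by
    unfold seg; simp
  rw [hseg]
  obtain ⟨x, t, rfl⟩ := List.exists_cons_of_ne_nil hne
  simp only [List.nil_append, List.map, PySem.List.max?_id_cons, Option.getD_some, mmax]
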